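-- pv_equiv track=rewrite | github.com/SmashAF/Random_Code_Storage | Code_wars_submitted.py | max_sum_between_two_negatives
-- ===== SOURCE A (Python) =====
-- def max_sum_between_two_negatives(arr):
--     res = []
--     for i, n in enumerate(arr):
--         if n < 0:
--             region_sum = 0
--             for m in arr[i+1::]:
--                 if m < 0:
--                     res.append(region_sum)
--                     break
--                 else:
--                     region_sum += m
--
--
--     return max(res) if len(res) > 0 else -1
-- ===== SOURCE B (Python) =====
-- def max_sum_between_two_negatives(arr):
--     best = None   # max over completed regions between two negatives
--     cur = None    # running sum since the last negative seen (None before the first)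
--     for n in arr:
--         if n < 0:
--             if cur is not None:
--                 best = cur if best is None else max(best, cur)
--             cur = 0
--         elif cur is not None:
--             cur += n
--     return -1 if best is None else best
-- ===== Notes on version B (the rewrite author's own statement) =====
-- stated objective: faster
-- what changed: A rescans the array forward from every negative element to sum its region (O(n^2)); B makes a single left-to-right pass keeping a running region sum reset at each negative and a running maximum of completed regions.
import Mathlib
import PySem

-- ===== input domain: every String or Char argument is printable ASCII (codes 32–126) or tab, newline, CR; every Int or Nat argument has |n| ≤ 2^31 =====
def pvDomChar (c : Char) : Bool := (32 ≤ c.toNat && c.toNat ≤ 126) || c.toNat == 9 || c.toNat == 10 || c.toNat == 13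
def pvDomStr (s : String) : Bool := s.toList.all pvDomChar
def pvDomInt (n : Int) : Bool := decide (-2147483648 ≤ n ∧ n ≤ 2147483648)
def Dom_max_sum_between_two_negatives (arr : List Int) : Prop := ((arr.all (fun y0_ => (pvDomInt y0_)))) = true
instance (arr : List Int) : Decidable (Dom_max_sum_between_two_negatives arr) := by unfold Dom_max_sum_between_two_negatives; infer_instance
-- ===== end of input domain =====

-- B replaces A's quadratic per-negative forward rescan by one pass with a running region sum
-- reset at each negative (objective: faster, asymptotic O(n^2) → O(n)).

-- ===== PORT A =====
-- inner 'for m in arr[i+1::]' loop: returns some region_sum if it hits a negative (break/append), none if it runs out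
def pvInnerA : List Int → Int → Option Int
  | [], _ => none
  | m :: rest, s => if m < 0 then some s else pvInnerA rest (s + m)

-- body of the outer 'for i, n in enumerate(arr)' loop
def pvStepA (arr res : List Int) (p : Int × Int) : List Int :=
  if p.2 < 0 then
    match pvInnerA (PySem.List.slice arr (some (p.1 + 1)) none) 0 with
    | some s => res ++ [s]
    | none => res
  else res

def max_sum_between_two_negatives (arr : List Int) : Int :=
  let res := (PySem.List.enumerate arr 0).foldl (pvStepA arr) []
  if res.length > 0 then
    match PySem.List.max? res (fun y => y) with
    | some m => m
    | none => -1
  else -1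

-- ===== PORT B =====
-- loop body of Source B: state = (best, cur), both Option Int (None ↔ none)
def pvStepB (p : Option Int × Option Int) (n : Int) : Option Int × Option Int :=
  if n < 0 then
    match p.2 with
    | some c => (some (match p.1 with | some b => max b c | none => c), some 0)
    | none => (p.1, some 0)
  else
    match p.2 with
    | some c => (p.1, some (c + n))
    | none => (p.1, none)

def max_sum_between_two_negatives_alt (arr : List Int) : Int :=
  match (arr.foldl pvStepB (none, none)).1 with
  | some b => b
  | none => -1

-- ===== PRECONDITION & SPEC =====
def Spec_max_sum_between_two_negatives (arr : List Int) (out : Int) : Prop := out = max_sum_between_two_negatives_alt arr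
instance (arr : List Int) (out : Int) : Decidable (Spec_max_sum_between_two_negatives arr out) := by unfold Spec_max_sum_between_two_negatives; infer_instance

-- ===== CLAIM (what is proved, stated in full; the proofs are below) =====
def Claim_equal_max_sum_between_two_negatives : Prop := ∀ (arr : List Int), Dom_max_sum_between_two_negatives arr → Spec_max_sum_between_two_negatives arr (max_sum_between_two_negatives arr)

-- ===== LEMMAS AND PROOFS =====

-- the list of region sums A collects, recursively
def gapsA : List Int → List Int
  | [] => []
  | n :: t =>
    if n < 0 then
      match pvInnerA t 0 with
      | some s => s :: gapsA t
      | none => gapsA t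
    else gapsA t

-- the same list as B sees it: gapsC l c = region sums of l given an open region with partial sum c
def gapsC : List Int → Int → List Int
  | [], _ => []
  | n :: t, c => if n < 0 then c :: gapsC t 0 else gapsC t (c + n)

def gapsAlt : List Int → List Int
  | [] => []
  | n :: t => if n < 0 then gapsC t 0 else gapsAlt t

-- running optional max, the shape of B's 'best' update
def optFoldMax : Option Int → List Int → Option Int
  | b, [] => b
  | b, x :: t => optFoldMax (some (match b with | some v => max v x | none => x)) t

lemma gapsC_eq (t : List Int) (c : Int) :
    gapsC t c = (match pvInnerA t c with | some s => [s] | none => []) ++ gapsAlt t := by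
  induction t generalizing c with
  | nil => rfl
  | cons m r ih =>
    by_cases hm : m < 0
    · simp [gapsC, pvInnerA, gapsAlt, hm]
    · simp only [gapsC, pvInnerA, gapsAlt, if_neg hm]
      exact ih (c + m)

lemma gapsA_eq_gapsAlt (l : List Int) : gapsA l = gapsAlt l := by
  induction l with
  | nil => rfl
  | cons n t ih =>
    by_cases hn : n < 0
    · simp only [gapsA, gapsAlt, if_pos hn, gapsC_eq t 0, ih]
      cases pvInnerA t 0 with
      | none => simp
      | some s => simp
    · simp [gapsA, gapsAlt, if_neg hn, ih]

lemma foldA_eq (suf : List Int) : ∀ (pref acc : List Int),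
    (PySem.List.enumerate suf (pref.length : Int)).foldl (pvStepA (pref ++ suf)) acc
      = acc ++ gapsA suf := by
  induction suf with
  | nil => intro pref acc; simp [PySem.List.enumerate_nil, gapsA]
  | cons n t ih =>
    intro pref acc
    rw [PySem.List.enumerate_cons, List.foldl_cons]
    have hslice : PySem.List.slice (pref ++ n :: t) (some ((pref.length : Int) + 1)) none = t := by
      have : ((pref.length : Int) + 1) = ((pref.length + 1 : Nat) : Int) := by push_cast; ring
      rw [this, PySem.List.slice_from_natCast]
      have : pref ++ n :: t = (pref ++ [n]) ++ t := by simp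
      rw [this]
      have hlen : pref.length + 1 = (pref ++ [n]).length := by simp
      rw [hlen, List.drop_left]
    have harr : pref ++ n :: t = (pref ++ [n]) ++ t := by simp
    have hlen : (pref.length : Int) + 1 = (((pref ++ [n]).length : Nat) : Int) := by simp
    have step : pvStepA (pref ++ n :: t) acc ((pref.length : Int), n)
        = if n < 0 then (match pvInnerA t 0 with | some s => acc ++ [s] | none => acc) else acc := by
      by_cases hn : n < 0
      · simp only [pvStepA, hslice, if_pos hn]
      · simp [pvStepA, hslice, if_neg hn]
    rw [step, hlen]
    have := ih (pref ++ [n])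
    rw [harr]
    by_cases hn : n < 0
    · simp only [if_pos hn]
      cases hinner : pvInnerA t 0 with
      | none => rw [ih (pref ++ [n]) acc]; simp [gapsA, hinner, hn]
      | some s => rw [ih (pref ++ [n]) (acc ++ [s])]; simp [gapsA, hinner, hn]
    · simp only [if_neg hn]
      rw [ih (pref ++ [n]) acc]; simp [gapsA, if_neg hn]

lemma foldB_eq (l : List Int) : ∀ (best : Option Int),
    ((l.foldl pvStepB (best, none)).1 = optFoldMax best (gapsAlt l)) ∧
    (∀ c, (l.foldl pvStepB (best, some c)).1 = optFoldMax best (gapsC l c)) := by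
  induction l with
  | nil => intro best; exact ⟨rfl, fun _ => rfl⟩
  | cons n t ih =>
    intro best
    constructor
    · by_cases hn : n < 0
      · simp only [List.foldl_cons, pvStepB, if_pos hn]
        simpa [gapsAlt, if_pos hn] using (ih best).2 0
      · simp only [List.foldl_cons, pvStepB, if_neg hn]
        simpa [gapsAlt, if_neg hn] using (ih best).1
    · intro c
      by_cases hn : n < 0
      · simp only [List.foldl_cons, pvStepB, if_pos hn]
        have := (ih (some (match best with | some b => max b c | none => c))).2 0
        simpa [gapsC, if_pos hn, optFoldMax] using this
      · simp only [List.foldl_cons, pvStepB, if_neg hn]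
        simpa [gapsC, if_neg hn] using (ih best).2 (c + n)

lemma optFoldMax_some (t : List Int) : ∀ v, optFoldMax (some v) t = some (t.foldl max v) := by
  induction t with
  | nil => intro v; rfl
  | cons x r ih => intro v; simp only [optFoldMax, List.foldl_cons]; exact ih (max v x)

-- ===== VERDICT (by name: the statement is the Claim_ definition above) =====
theorem max_sum_between_two_negatives_spec : Claim_equal_max_sum_between_two_negatives := by
  intro arr _
  unfold Spec_max_sum_between_two_negatives max_sum_between_two_negatives max_sum_between_two_negatives_alt
  have hres : (PySem.List.enumerate arr 0).foldl (pvStepA arr) [] = gapsA arr := by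
    have := foldA_eq arr [] []
    simpa using this
  rw [hres, (foldB_eq arr none).1, ← gapsA_eq_gapsAlt]
  cases hg : gapsA arr with
  | nil => simp [optFoldMax]
  | cons x t =>
    simp [PySem.List.max?_id_cons, optFoldMax, optFoldMax_some]
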